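-- pv_equiv track=rewrite | github.com/palmkeep/Collab_Python | la3/la3.py | split_rec
-- ===== SOURCE A (Python) =====
-- def split_rec(jumbledString):
--     a = ''
--     b = ''
--
--     if not jumbledString:
--         return a, b
--     else:
--         c = jumbledString[0]
--         if c.islower() or c == '.' or c == '_':
--             a = c
--         elif c.isupper() or c == ' ' or c == '|':
--             b = c
--         restJumbledString = split_rec(jumbledString[1:])
--         return a + restJumbledString[0], b + restJumbledString[1]
-- ===== SOURCE B (Python) =====
-- def split_rec(jumbledString):
--     a = ''.join(c for c in jumbledString if c.islower() or c == '.' or c == '_')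
--     b = ''.join(c for c in jumbledString if c.isupper() or c == ' ' or c == '|')
--     return a, b
-- ===== Notes on version B (the rewrite author's own statement) =====
-- stated objective: idiomatic
-- what changed: Replaces the character-by-character recursion (which rebuilds both suffix results with string concatenation at every level) by two independent full filtering passes, one per category, joined once.
import Mathlib
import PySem

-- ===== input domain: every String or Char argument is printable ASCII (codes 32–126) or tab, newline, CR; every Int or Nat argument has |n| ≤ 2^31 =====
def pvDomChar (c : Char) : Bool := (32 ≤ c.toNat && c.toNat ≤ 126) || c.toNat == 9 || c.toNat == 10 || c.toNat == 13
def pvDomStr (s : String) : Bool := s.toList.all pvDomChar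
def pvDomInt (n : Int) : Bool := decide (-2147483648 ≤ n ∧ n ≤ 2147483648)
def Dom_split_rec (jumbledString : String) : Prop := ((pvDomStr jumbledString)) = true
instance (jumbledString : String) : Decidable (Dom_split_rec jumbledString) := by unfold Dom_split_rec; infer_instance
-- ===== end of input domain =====

-- B replaces A's single recursive traversal by two independent filtering passes (one per character category), joined once; proved to return the same pair on all of Dom.


-- ===== PORT A =====
-- A's recursion: look at the first character, sort it into a or b (or drop it),
-- recurse on the rest, and prepend.  Done on List Char (s[0] / s[1:] = head / tail).
def splitRecGo (cs : List Char) : List Char × List Char :=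
  match cs with
  | [] => ([], [])
  | c :: rest =>
    let a : List Char := if PySem.Chars.islower c || c == '.' || c == '_' then [c] else []
    let b : List Char :=
      if !(PySem.Chars.islower c || c == '.' || c == '_') &&
         (PySem.Chars.isupper c || c == ' ' || c == '|') then [c] else []
    let r := splitRecGo rest
    (a ++ r.1, b ++ r.2)

def split_rec (jumbledString : String) : String × String :=
  let p := splitRecGo jumbledString.toList
  (String.mk p.1, String.mk p.2)

-- ===== PORT B =====
-- two independent full passes, each filtering for one category
def split_rec_alt (jumbledString : String) : String × String :=
  (String.mk (jumbledString.toList.filter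
      (fun c => PySem.Chars.islower c || c == '.' || c == '_')),
   String.mk (jumbledString.toList.filter
      (fun c => PySem.Chars.isupper c || c == ' ' || c == '|')))

-- ===== PRECONDITION & SPEC =====
def Spec_split_rec (jumbledString : String) (out : String × String) : Prop := out = split_rec_alt jumbledString
instance (jumbledString : String) (out : String × String) : Decidable (Spec_split_rec jumbledString out) := by unfold Spec_split_rec; infer_instance

-- ===== CLAIM (what is proved, stated in full; the proofs are below) =====
def Claim_equal_split_rec : Prop := ∀ (jumbledString : String), Dom_split_rec jumbledString → Spec_split_rec jumbledString (split_rec jumbledString)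

-- ===== LEMMAS AND PROOFS =====

-- A lowercase letter / '.' / '_' is never uppercase / ' ' / '|',
-- so A's elif-guarded branch coincides with B's second filter.
lemma not_both (c : Char) :
    (PySem.Chars.islower c || c == '.' || c == '_') = true →
    (PySem.Chars.isupper c || c == ' ' || c == '|') = false := by
  have e1 : 'a'.val.toNat = 97 := rfl
  have e2 : 'z'.val.toNat = 122 := rfl
  have e3 : 'A'.val.toNat = 65 := rfl
  have e4 : 'Z'.val.toNat = 90 := rfl
  have e5 : '.'.val.toNat = 46 := rfl
  have e6 : '_'.val.toNat = 95 := rfl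
  have e7 : ' '.val.toNat = 32 := rfl
  have e8 : '|'.val.toNat = 124 := rfl
  simp only [PySem.Chars.islower, PySem.Chars.isupper, Bool.or_eq_true, Bool.or_eq_false_iff,
    Bool.and_eq_true, Bool.and_eq_false_iff, decide_eq_true_eq, decide_eq_false_iff_not,
    beq_iff_eq, beq_eq_false_iff_ne, ne_eq, Char.le_def, Char.ext_iff, Char.toNat,
    UInt32.le_iff_toNat_le, UInt32.ext_iff, e1, e2, e3, e4, e5, e6, e7, e8]
  omega

lemma splitRecGo_eq (cs : List Char) :
    splitRecGo cs =
      (cs.filter (fun c => PySem.Chars.islower c || c == '.' || c == '_'),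
       cs.filter (fun c => PySem.Chars.isupper c || c == ' ' || c == '|')) := by
  induction cs with
  | nil => rfl
  | cons c rest ih =>
    simp only [splitRecGo, ih, List.filter_cons]
    by_cases h : (PySem.Chars.islower c || c == '.' || c == '_') = true
    · have hb := not_both c h
      simp only [Bool.or_eq_false_iff, beq_eq_false_iff_ne, ne_eq] at hb
      simp [h, hb.1.1, hb.1.2, hb.2]
    · by_cases h2 : (PySem.Chars.isupper c || c == ' ' || c == '|') = true <;>
        simp [h, h2]

-- ===== VERDICT (by name: the statement is the Claim_ definition above) =====
theorem split_rec_spec : Claim_equal_split_rec := by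
  intro s _
  unfold Spec_split_rec split_rec split_rec_alt
  simp [splitRecGo_eq s.toList]
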